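-- pv_equiv track=rewrite | github.com/AsterWang/leecode | generate_suffix.py | generate_prefix
-- ===== SOURCE A (Python) =====
-- def generate_prefix(str, sign=''):
--     prefixes = []
--     for i in range(len(str)+1):
--         prefixes.append(str[:i]);
--     if not sign:
--         return prefixes
--     else:
--         return prefixes + [sign]
-- ===== SOURCE B (Python) =====
-- def generate_prefix(str, sign=''):
--     acc = str[:0]
--     prefixes = [acc]
--     for ch in str:
--         acc = acc + ch
--         prefixes.append(acc)
--     if not sign:
--         return prefixes
--     else:
--         return prefixes + [sign]
-- ===== Notes on version B (the rewrite author's own statement) =====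
-- stated objective: alternative
-- what changed: Each prefix is built incrementally by extending a running accumulator with the next character, instead of slicing str[:i] from the start for every i in range(len+1).
import Mathlib
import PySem

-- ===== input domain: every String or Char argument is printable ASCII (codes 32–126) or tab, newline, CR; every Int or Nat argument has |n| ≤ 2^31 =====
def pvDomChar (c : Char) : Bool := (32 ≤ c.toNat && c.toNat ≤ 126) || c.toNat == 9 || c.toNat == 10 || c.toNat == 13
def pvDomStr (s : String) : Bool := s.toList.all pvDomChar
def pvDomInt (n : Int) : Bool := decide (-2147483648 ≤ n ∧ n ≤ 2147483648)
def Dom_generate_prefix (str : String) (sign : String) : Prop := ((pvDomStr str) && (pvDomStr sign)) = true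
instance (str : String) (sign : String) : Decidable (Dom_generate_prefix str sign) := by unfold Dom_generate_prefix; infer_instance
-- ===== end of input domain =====

-- B builds each prefix by extending a running accumulator instead of slicing str[:i] afresh; alternative decomposition, same cost.

-- ===== PORT A =====
-- prefixes = []; for i in range(len(str)+1): prefixes.append(str[:i])
def generate_prefix (str : String) (sign : String) : List String :=
  let cs := str.toList
  let prefixes :=
    (PySem.List.pyRange 0 ((cs.length : Int) + 1) 1).foldl
      (fun acc i => acc ++ [String.ofList (PySem.List.slice cs none (some i))]) []
  if sign.toList = [] then prefixes else prefixes ++ [sign]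

-- ===== PORT B =====
-- acc = str[:0]; prefixes = [acc]; for ch in str: acc = acc + ch; prefixes.append(acc)
-- (the running string accumulator is kept as a List Char; String.ofList packs it when appended)
def generate_prefix_alt (str : String) (sign : String) : List String :=
  let cs := str.toList
  let st := cs.foldl
      (fun (st : List Char × List String) ch =>
        let acc := st.1 ++ [ch]
        (acc, st.2 ++ [String.ofList acc]))
      (PySem.List.slice cs none (some 0), [String.ofList (PySem.List.slice cs none (some 0))])
  if sign.toList = [] then st.2 else st.2 ++ [sign]

-- ===== PRECONDITION & SPEC =====
def Spec_generate_prefix (str : String) (sign : String) (out : List String) : Prop := out = generate_prefix_alt str sign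
instance (str : String) (sign : String) (out : List String) : Decidable (Spec_generate_prefix str sign out) := by unfold Spec_generate_prefix; infer_instance

-- ===== CLAIM (what is proved, stated in full; the proofs are below) =====
def Claim_equal_generate_prefix : Prop := ∀ (str : String) (sign : String), Dom_generate_prefix str sign → Spec_generate_prefix str sign (generate_prefix str sign)

-- ===== LEMMAS AND PROOFS =====

-- B's loop, generalized over the accumulator pair: it appends String.ofList (pre ++ take (k+1)) for each k.
theorem b_loop (cs : List Char) (pre : List Char) (out : List String) :
    (cs.foldl
      (fun (st : List Char × List String) ch =>
        let acc := st.1 ++ [ch]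
        (acc, st.2 ++ [String.ofList acc]))
      (pre, out)).2
    = out ++ (List.range cs.length).map (fun k => String.ofList (pre ++ cs.take (k + 1))) := by
  induction cs generalizing pre out with
  | nil => simp
  | cons c cs ih =>
    simp only [List.foldl_cons, ih, List.length_cons, List.range_succ_eq_map, List.map_cons,
      List.map_map, List.take_succ_cons]
    simp [List.append_assoc, Function.comp]

-- A's loop equals the same map of takes.
theorem a_loop (cs : List Char) :
    (PySem.List.pyRange 0 ((cs.length : Int) + 1) 1).foldl
      (fun acc i => acc ++ [String.ofList (PySem.List.slice cs none (some i))]) []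
    = String.ofList [] :: (List.range cs.length).map (fun k => String.ofList (cs.take (k + 1))) := by
  rw [PySem.List.foldl_append_singleton_eq_map]
  have : ((cs.length : Int) + 1) = ((cs.length + 1 : Nat) : Int) := by push_cast; ring
  rw [this, PySem.List.pyRange_zero_natCast]
  simp only [List.range_succ_eq_map, List.map_cons, List.map_map, List.nil_append]
  refine List.cons_eq_cons.mpr ⟨by simp [PySem.List.slice], List.map_congr_left ?_⟩
  intro k _
  have h := PySem.List.slice_to_natCast cs (k + 1)
  simp only [Function.comp_apply]
  push_cast at h ⊢
  rw [h]

theorem generate_prefix_eq (str sign : String) :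
    generate_prefix str sign = generate_prefix_alt str sign := by
  unfold generate_prefix generate_prefix_alt
  simp only [a_loop, b_loop]
  simp [PySem.List.slice]

-- ===== VERDICT (by name: the statement is the Claim_ definition above) =====
theorem generate_prefix_spec : Claim_equal_generate_prefix := by
  intro str sign _
  unfold Spec_generate_prefix
  exact generate_prefix_eq str sign
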